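-- pv_equiv track=rewrite | github.com/Ta-Ye/CodeTest | Programmers/섬 연결하기.py | check
-- ===== SOURCE A (Python) =====
-- def check(ck,bridge,start,end):
--     if end in bridge[start]:
--         return False
--
--     for s in bridge[start]:
--         if ck[s]==1:
--             continue
--         ck[s]=1
--         if check(ck,bridge,s,end)==False:
--             return False
--     else:
--         return True
-- ===== SOURCE B (Python) =====
-- # Iterative re-implementation: explicit stack of pending-neighbour lists instead of
-- # recursion; marks ck in the same preorder and short-circuits at the same point.
-- # Like A, it mutates ck in place (equivalence claimed for the return value; the
-- # mutation on ck is identical on inputs satisfying Pre_).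
-- def _next_unmarked(ck, stack):
--     # pop exhausted frames / skip already-marked nodes; return next node to visit
--     while stack:
--         frame = stack[-1]
--         while frame:
--             s = frame.pop(0)
--             if ck[s] == 1:
--                 continue
--             return s
--         stack.pop()
--     return None
--
-- def check(ck, bridge, start, end):
--     if end in bridge[start]:
--         return False
--     stack = [list(bridge[start])]
--     while True:
--         s = _next_unmarked(ck, stack)
--         if s is None:
--             return True
--         ck[s] = 1
--         if end in bridge[s]:
--             return False
--         stack.append(list(bridge[s]))
-- ===== Notes on version B (the rewrite author's own statement) =====
-- stated objective: alternative
-- what changed: The recursive DFS (recursion per visited node, for-loop over siblings) is replaced by an iterative loop over an explicit stack of pending-neighbour lists that marks nodes in the same preorder, performs the same dict lookups in the same order (so it raises KeyError exactly where A does) and short-circuits at the same point. Pre_ is the natural well-formed-graph domain: every node the traversal can reach must be a key of bridge and its neighbours keys of ck (not required past an end-adjacent node, where the search decides and stops); …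
-- outside the precondition, e.g. on check({1: 0, 2: 0}, {0: [1, 2], 1: [5]}, 0, 5): A returns False, B returns False
import Mathlib
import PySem

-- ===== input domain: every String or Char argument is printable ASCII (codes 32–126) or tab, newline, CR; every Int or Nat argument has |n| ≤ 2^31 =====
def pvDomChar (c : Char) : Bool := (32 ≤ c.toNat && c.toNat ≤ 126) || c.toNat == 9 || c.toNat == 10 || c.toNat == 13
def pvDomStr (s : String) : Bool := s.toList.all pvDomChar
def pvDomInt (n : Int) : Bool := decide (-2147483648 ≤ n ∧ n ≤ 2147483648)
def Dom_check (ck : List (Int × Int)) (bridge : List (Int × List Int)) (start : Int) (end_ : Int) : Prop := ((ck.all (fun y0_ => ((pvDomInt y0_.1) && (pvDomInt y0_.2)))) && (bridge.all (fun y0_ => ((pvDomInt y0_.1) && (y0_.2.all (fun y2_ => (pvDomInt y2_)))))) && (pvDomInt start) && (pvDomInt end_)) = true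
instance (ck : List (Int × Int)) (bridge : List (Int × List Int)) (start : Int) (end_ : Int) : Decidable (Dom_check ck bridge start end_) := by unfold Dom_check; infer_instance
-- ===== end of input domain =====

-- B replaces A's recursive DFS by an iterative one over an explicit stack of
-- pending-neighbour lists (objective: alternative decomposition, same cost).
-- Both A and B mutate the ck dict in place identically; the equivalence proved
-- here is about the RETURN value.
-- ===== PORT A =====
-- Helpers for Python dict operations (on the assoc lists the dicts are passed as);
-- a missing key raises KeyError in Python, so the `.getD` defaults are only
-- reached outside Pre_check.
def pvNbrs (bridge : List (Int × List Int)) (v : Int) : List Int :=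
  ((PySem.Dict.mk bridge).get? v).getD []

def pvMark (ck : List (Int × Int)) (s : Int) : List (Int × Int) :=
  ((PySem.Dict.mk ck).insert s 1).items

def pvCk (ck : List (Int × Int)) (s : Int) : Int :=
  ((PySem.Dict.mk ck).get? s).getD 0

-- A's `for s in bridge[start]` loop; `cur` is threaded fuel, decremented exactly
-- when a node is marked, purely as a totality guard (with initial fuel
-- ck.length + 1 it never runs out on inputs satisfying Pre_check, since every
-- mark sets one existing ck key to 1); `child` is the recursive call.
def loopA (child : List (Int × Int) → Nat → Int → (List (Int × Int) × Nat × Bool))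
    (ck : List (Int × Int)) (cur : Nat) (ns : List Int) : List (Int × Int) × Nat × Bool :=
  match ns with
  | [] => (ck, cur, true)
  | s :: rest =>
    if pvCk ck s == 1 then loopA child ck cur rest
    else
      match cur with
      | 0 => (ck, 0, true)            -- fuel guard (never reached with the initial fuel)
      | c + 1 =>
        let r := child (pvMark ck s) c s
        if r.2.2 = false then (r.1, r.2.1, false)
        else loopA child r.1 r.2.1 rest

-- Literal port of A's recursion; structural on the bound `b` (a second totality
-- guard, kept strictly above `cur` so its 0-case is unreachable).
def goA : Nat → List (Int × List Int) → Int → List (Int × Int) → Nat → Int →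
    List (Int × Int) × Nat × Bool
  | 0, _, _, ck, cur, _ => (ck, cur, true)
  | b + 1, bridge, end_, ck, cur, node =>
    if (pvNbrs bridge node).contains end_ then (ck, cur, false)
    else loopA (goA b bridge end_) ck cur (pvNbrs bridge node)

def check (ck : List (Int × Int)) (bridge : List (Int × List Int)) (start : Int) (end_ : Int) : Bool :=
  (goA (ck.length + 2) bridge end_ ck (ck.length + 1) start).2.2

-- ===== PORT B =====
-- Port of _next_unmarked: skip marked nodes in the top frame, pop exhausted
-- frames; returns the node to visit and the remaining stack.
def drainFrame (ck : List (Int × Int)) : List Int → Option (Int × List Int)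
  | [] => none
  | s :: p => if pvCk ck s == 1 then drainFrame ck p else some (s, p)

def drain (ck : List (Int × Int)) : List (List Int) → Option (Int × List (List Int))
  | [] => none
  | f :: rest =>
    match drainFrame ck f with
    | some (s, p) => some (s, p :: rest)
    | none => drain ck rest

-- Port of B's main `while True` loop; fuel decremented exactly at each mark,
-- as in A's port (a totality guard, never reached with the initial fuel on
-- inputs satisfying Pre_check).
def stepB : Nat → List (Int × List Int) → Int → List (Int × Int) → List (List Int) →
    List (Int × Int) × Bool
  | 0, _, _, ck, _ => (ck, true)      -- fuel guard
  | c + 1, bridge, end_, ck, stack =>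
    match drain ck stack with
    | none => (ck, true)
    | some (s, stack') =>
      let ck' := pvMark ck s
      if (pvNbrs bridge s).contains end_ then (ck', false)
      else stepB c bridge end_ ck' (pvNbrs bridge s :: stack')

def check_alt (ck : List (Int × Int)) (bridge : List (Int × List Int)) (start : Int) (end_ : Int) : Bool :=
  if (pvNbrs bridge start).contains end_ then false
  else (stepB (ck.length + 1) bridge end_ ck [pvNbrs bridge start]).2

-- ===== PRECONDITION & SPEC =====

-- Pre-side helper: bounded transitive closure of the edge relation, restricted
-- to initially-unmarked targets and pruned at end-adjacent nodes (where the
-- traversal decides and looks no further): a graph property of the input,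
-- iterated enough times to reach its fixpoint.
def pvReach (ck : List (Int × Int)) (bridge : List (Int × List Int)) (start : Int) (end_ : Int) : List Int :=
  (fun R => PySem.Set.update R
      (R.flatMap (fun v =>
        if (pvNbrs bridge v).contains end_ then []
        else (pvNbrs bridge v).filter (fun s => !(pvCk ck s == 1)))))^[(bridge.flatMap (fun p => p.2)).length + 1]
    [start]

-- Pre_check is the function's natural domain: a well-formed adjacency input,
-- i.e. every node the traversal can reach is a key of bridge and (unless that
-- node is end-adjacent, where the search decides and stops) its neighbours are
-- keys of ck.  Outside it both Pythons raise KeyError on the missing key,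
-- except on a handful of inputs where the DFS happens to reach an end-adjacent
-- node before the missing key and both A and B still return False (a
-- traversal-order accident; see claim.json "cites").  B raises exactly where
-- A raises.  The equivalence lemma check_eq_alt below holds for ALL inputs;
-- Pre_check only delimits where the Python originals return rather than raise.
def Pre_check (ck : List (Int × Int)) (bridge : List (Int × List Int)) (start : Int) (end_ : Int) : Prop :=
  start ∈ bridge.map (·.1) ∧
  ∀ v ∈ pvReach ck bridge start end_,
    v ∈ bridge.map (·.1) ∧
      (end_ ∈ pvNbrs bridge v ∨ ∀ s ∈ pvNbrs bridge v, s ∈ ck.map (·.1))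

instance (ck : List (Int × Int)) (bridge : List (Int × List Int)) (start : Int) (end_ : Int) : Decidable (Pre_check ck bridge start end_) := by unfold Pre_check; infer_instance

def pvWitness_check : (List (Int × Int)) × (List (Int × List Int)) × Int × Int :=
  ([(0, 0), (1, 0), (2, 1)], [(0, [1, 2]), (1, [0]), (2, [])], 0, 5)

def Spec_check (ck : List (Int × Int)) (bridge : List (Int × List Int)) (start : Int) (end_ : Int) (out : Bool) : Prop := out = check_alt ck bridge start end_
instance (ck : List (Int × Int)) (bridge : List (Int × List Int)) (start : Int) (end_ : Int) (out : Bool) : Decidable (Spec_check ck bridge start end_ out) := by unfold Spec_check; infer_instance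

-- ===== CLAIM (what is proved, stated in full; the proofs are below) =====
def Claim_equal_check : Prop := ∀ (ck : List (Int × Int)) (bridge : List (Int × List Int)) (start : Int) (end_ : Int), Dom_check ck bridge start end_ → Pre_check ck bridge start end_ → Spec_check ck bridge start end_ (check ck bridge start end_)

-- ===== LEMMAS AND PROOFS =====

-- With no fuel left, A's sibling loop aborts with `true` and ck unchanged.
theorem loopA_zero (child : List (Int × Int) → Nat → Int → (List (Int × Int) × Nat × Bool)) :
    ∀ (ns : List Int) (ck : List (Int × Int)), loopA child ck 0 ns = (ck, 0, true) := by
  intro ns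
  induction ns with
  | nil => intro ck; rfl
  | cons s p IH =>
    intro ck
    simp only [loopA]
    by_cases hm : (pvCk ck s == 1) = true
    · simp only [hm, if_true]; exact IH ck
    · simp [hm]

-- The threaded fuel never increases (generic in the recursive call).
theorem loopA_fuel_le (child : List (Int × Int) → Nat → Int → (List (Int × Int) × Nat × Bool))
    (hc : ∀ (ck : List (Int × Int)) (c : Nat) (s : Int), (child ck c s).2.1 ≤ c) :
    ∀ (ns : List Int) (ck : List (Int × Int)) (cur : Nat),
    (loopA child ck cur ns).2.1 ≤ cur := by
  intro ns
  induction ns with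
  | nil => intro ck cur; simp [loopA]
  | cons s p IH =>
    intro ck cur
    simp only [loopA]
    by_cases hm : (pvCk ck s == 1) = true
    · simp only [hm, if_true]; exact IH ck cur
    · simp only [hm, Bool.false_eq_true, if_false]
      cases cur with
      | zero => simp
      | succ c =>
        simp only
        by_cases hb : (child (pvMark ck s) c s).2.2 = false
        · simp only [hb, if_true]
          have := hc (pvMark ck s) c s
          omega
        · have hb' : (child (pvMark ck s) c s).2.2 = true := by
            revert hb; cases (child (pvMark ck s) c s).2.2 <;> simp
          simp only [hb', Bool.true_eq_false, if_false]
          have h1 := hc (pvMark ck s) c s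
          have h2 := IH (child (pvMark ck s) c s).1 (child (pvMark ck s) c s).2.1
          omega

theorem goA_fuel_le : ∀ (b : Nat) (bridge : List (Int × List Int)) (end_ : Int)
    (ck : List (Int × Int)) (cur : Nat) (node : Int),
    (goA b bridge end_ ck cur node).2.1 ≤ cur := by
  intro b
  induction b with
  | zero => intro bridge end_ ck cur node; simp [goA]
  | succ b IH =>
    intro bridge end_ ck cur node
    rw [goA]
    by_cases hc : end_ ∈ pvNbrs bridge node
    · simp [hc]
    · simp only [List.contains_eq_mem, hc, decide_false, Bool.false_eq_true, if_false]
      exact loopA_fuel_le (goA b bridge end_) (fun ck c s => IH bridge end_ ck c s) _ ck cur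

-- The loop's value does not depend on the recursive call beyond fuels < cur.
theorem loopA_congr (child₁ child₂ : List (Int × Int) → Nat → Int → (List (Int × Int) × Nat × Bool))
    (hle : ∀ (ck : List (Int × Int)) (c : Nat) (s : Int), (child₁ ck c s).2.1 ≤ c) :
    ∀ (ns : List Int) (ck : List (Int × Int)) (cur : Nat),
    (∀ (ck' : List (Int × Int)) (c : Nat) (s : Int), c < cur → child₁ ck' c s = child₂ ck' c s) →
    loopA child₁ ck cur ns = loopA child₂ ck cur ns := by
  intro ns
  induction ns with
  | nil => intro ck cur hag; rfl
  | cons s p IH =>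
    intro ck cur hag
    simp only [loopA]
    by_cases hm : (pvCk ck s == 1) = true
    · simp only [hm, if_true]; exact IH ck cur hag
    · simp only [hm, Bool.false_eq_true, if_false]
      cases cur with
      | zero => rfl
      | succ c =>
        simp only
        rw [← hag (pvMark ck s) c s (by omega)]
        by_cases hb : (child₁ (pvMark ck s) c s).2.2 = false
        · simp [hb]
        · simp only [hb]
          refine IH _ _ (fun ck' c' s' hc' => hag ck' c' s' ?_)
          have := hle (pvMark ck s) c s
          omega

-- The structural bound is irrelevant as long as it exceeds the threaded fuel.
theorem goA_irrel : ∀ (b b₂ : Nat) (bridge : List (Int × List Int)) (end_ : Int)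
    (ck : List (Int × Int)) (cur : Nat) (node : Int), cur < b → cur < b₂ →
    goA b bridge end_ ck cur node = goA b₂ bridge end_ ck cur node := by
  intro b
  induction b with
  | zero => intro b₂ bridge end_ ck cur node h1; omega
  | succ b IH =>
    intro b₂ bridge end_ ck cur node h1 h2
    cases b₂ with
    | zero => omega
    | succ b₂ =>
      rw [goA, goA]
      by_cases hc : end_ ∈ pvNbrs bridge node
      · simp [hc]
      · simp only [List.contains_eq_mem, hc, decide_false, Bool.false_eq_true, if_false]
        refine loopA_congr _ _ (fun ck c s => goA_fuel_le b bridge end_ ck c s) _ ck cur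
          (fun ck' c s hlt => IH b₂ bridge end_ ck' c s (by omega) (by omega))

-- Lockstep simulation: running B's machine on stack (ns :: rest) equals running
-- A's sibling loop on ns and then continuing with the rest of the stack.
theorem main_sim : ∀ (cur b : Nat) (bridge : List (Int × List Int)) (end_ : Int)
    (ns : List Int) (ck : List (Int × Int)) (rest : List (List Int)), cur ≤ b →
    stepB cur bridge end_ ck (ns :: rest) =
      (if (loopA (goA b bridge end_) ck cur ns).2.2
       then stepB (loopA (goA b bridge end_) ck cur ns).2.1 bridge end_
              (loopA (goA b bridge end_) ck cur ns).1 rest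
       else ((loopA (goA b bridge end_) ck cur ns).1, false)) := by
  intro cur
  induction cur using Nat.strong_induction_on with
  | _ cur SIH =>
    cases cur with
    | zero =>
      intro b bridge end_ ns ck rest _
      rw [loopA_zero]
      simp [stepB]
    | succ c =>
      intro b bridge end_ ns
      induction ns with
      | nil =>
        intro ck rest _
        simp only [loopA]
        simp only [if_true]
        rw [stepB, stepB]
        rfl
      | cons s p IHp =>
        intro ck rest hb
        simp only [loopA]
        by_cases hm : (pvCk ck s == 1) = true
        · rw [show stepB (c+1) bridge end_ ck ((s :: p) :: rest) =
                stepB (c+1) bridge end_ ck (p :: rest) from by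
              rw [stepB, stepB]; simp [drain, drainFrame, hm]]
          simp only [hm, if_true]
          exact IHp ck rest hb
        · simp only [hm, Bool.false_eq_true, if_false]
          cases b with
          | zero => omega
          | succ b =>
            rw [stepB]
            simp only [drain, drainFrame, hm, Bool.false_eq_true, if_false]
            rw [goA]
            by_cases hcn : end_ ∈ pvNbrs bridge s
            · simp [hcn]
            · simp only [List.contains_eq_mem, hcn, decide_false, Bool.false_eq_true, if_false]
              set l := loopA (goA b bridge end_) (pvMark ck s) c (pvNbrs bridge s) with hl
              have hle : l.2.1 ≤ c :=
                loopA_fuel_le _ (fun ck c s => goA_fuel_le b bridge end_ ck c s) _ _ c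
              rw [SIH c (by omega) b bridge end_ (pvNbrs bridge s) (pvMark ck s)
                    (p :: rest) (by omega), ← hl]
              by_cases hb2 : l.2.2 = true
              · simp only [hb2, if_true, Bool.true_eq_false, if_false]
                rw [SIH l.2.1 (by omega) b bridge end_ p l.1 rest (by omega)]
                rw [loopA_congr (goA b bridge end_) (goA (b+1) bridge end_)
                      (fun ck c s => goA_fuel_le b bridge end_ ck c s) p l.1 l.2.1
                      (fun ck' c' s' h' => goA_irrel b (b+1) bridge end_ ck' c' s'
                        (by omega) (by omega))]
              · have hb2' : l.2.2 = false := by revert hb2; cases l.2.2 <;> simp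
                simp [hb2']

-- The ports agree on ALL inputs (Pre_check is not needed for the equality;
-- it only marks where the Pythons return rather than raise).
theorem check_eq_alt (ck : List (Int × Int)) (bridge : List (Int × List Int))
    (start end_ : Int) : check ck bridge start end_ = check_alt ck bridge start end_ := by
  unfold check check_alt
  rw [goA]
  by_cases hc : end_ ∈ pvNbrs bridge start
  · simp [hc]
  · simp only [List.contains_eq_mem, hc, decide_false, Bool.false_eq_true, if_false]
    rw [main_sim (ck.length + 1) (ck.length + 1) bridge end_ (pvNbrs bridge start) ck [] le_rfl]
    set l := loopA (goA (ck.length + 1) bridge end_) ck (ck.length + 1) (pvNbrs bridge start) with hl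
    by_cases hb : l.2.2 = true
    · simp only [hb, if_true]
      cases h2 : l.2.1 with
      | zero => rfl
      | succ c => rw [stepB]; rfl
    · have hb' : l.2.2 = false := by revert hb; cases l.2.2 <;> simp
      simp [hb']

-- ===== VERDICT (by name: the statement is the Claim_ definition above) =====
theorem check_spec : Claim_equal_check := by
  intro ck bridge start end_ _ _
  unfold Spec_check
  exact check_eq_alt ck bridge start end_
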